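-- pv_equiv track=rewrite | github.com/MrXrono/NanoredAPI | app/services/remnawave_adult.py | _bucket_table_names_for_candidates
-- ===== SOURCE A (Python) =====
-- ADULT_BUCKET_FILE_TO_TABLE = {
--     "0-9.txt": "adult_domain_bucket_0_9",
--     "a-d.txt": "adult_domain_bucket_a_d",
--     "e-h.txt": "adult_domain_bucket_e_h",
--     "i-l.txt": "adult_domain_bucket_i_l",
--     "m-p.txt": "adult_domain_bucket_m_p",
--     "q-t.txt": "adult_domain_bucket_q_t",
--     "u-x.txt": "adult_domain_bucket_u_x",
--     "y-z.txt": "adult_domain_bucket_y_z",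
--     "old.txt": "adult_domain_bucket_old",
-- }
--
-- def _bucket_file_for_domain(domain: str) -> str:
--     ch = (domain.strip().lower()[:1] if domain else "")
--     if not ch:
--         return "old.txt"
--     if ch.isdigit():
--         return "0-9.txt"
--     if "a" <= ch <= "d":
--         return "a-d.txt"
--     if "e" <= ch <= "h":
--         return "e-h.txt"
--     if "i" <= ch <= "l":
--         return "i-l.txt"
--     if "m" <= ch <= "p":
--         return "m-p.txt"
--     if "q" <= ch <= "t":
--         return "q-t.txt"
--     if "u" <= ch <= "x":
--         return "u-x.txt"
--     if "y" <= ch <= "z":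
--         return "y-z.txt"
--     return "old.txt"
--
-- def _bucket_table_names_for_candidates(candidates: list[str]) -> list[str]:
--     if not candidates:
--         return [ADULT_BUCKET_FILE_TO_TABLE["old.txt"]]
--     names: set[str] = set()
--     for candidate in candidates:
--         bucket_file = _bucket_file_for_domain(candidate)
--         names.add(ADULT_BUCKET_FILE_TO_TABLE.get(bucket_file, ADULT_BUCKET_FILE_TO_TABLE["old.txt"]))
--     names.add(ADULT_BUCKET_FILE_TO_TABLE["old.txt"])
--     ordered = [table for table in ADULT_BUCKET_FILE_TO_TABLE.values() if table in names]
--     return ordered or [ADULT_BUCKET_FILE_TO_TABLE["old.txt"]]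
-- ===== SOURCE B (Python) =====
-- _BUCKET_CHARSETS = [
--     ("adult_domain_bucket_0_9", "0123456789"),
--     ("adult_domain_bucket_a_d", "abcd"),
--     ("adult_domain_bucket_e_h", "efgh"),
--     ("adult_domain_bucket_i_l", "ijkl"),
--     ("adult_domain_bucket_m_p", "mnop"),
--     ("adult_domain_bucket_q_t", "qrst"),
--     ("adult_domain_bucket_u_x", "uvwx"),
--     ("adult_domain_bucket_y_z", "yz"),
-- ]
--
--
-- def _bucket_table_names_for_candidates(candidates: list[str]) -> list[str]:
--     firsts = [t[0] for t in (c.strip().lower() for c in candidates) if t]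
--     tables = [table for table, chars in _BUCKET_CHARSETS
--               if any(ch in chars for ch in firsts)]
--     tables.append("adult_domain_bucket_old")
--     return tables
-- ===== Notes on version B (the rewrite author's own statement) =====
-- stated objective: simpler
-- what changed: Inverts the traversal: instead of classifying each candidate into a bucket via a 9-way comparison chain and collecting hit table names in a set keyed through a dict, B precomputes the normalized first characters once and then iterates the eight fixed (table, charset) pairs in output order, emitting a table when any first character lies in its charset and appending the always-included old table; the set, the dict, the per-candidate classification and the empty-input special case all disappear.
import Mathlib
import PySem

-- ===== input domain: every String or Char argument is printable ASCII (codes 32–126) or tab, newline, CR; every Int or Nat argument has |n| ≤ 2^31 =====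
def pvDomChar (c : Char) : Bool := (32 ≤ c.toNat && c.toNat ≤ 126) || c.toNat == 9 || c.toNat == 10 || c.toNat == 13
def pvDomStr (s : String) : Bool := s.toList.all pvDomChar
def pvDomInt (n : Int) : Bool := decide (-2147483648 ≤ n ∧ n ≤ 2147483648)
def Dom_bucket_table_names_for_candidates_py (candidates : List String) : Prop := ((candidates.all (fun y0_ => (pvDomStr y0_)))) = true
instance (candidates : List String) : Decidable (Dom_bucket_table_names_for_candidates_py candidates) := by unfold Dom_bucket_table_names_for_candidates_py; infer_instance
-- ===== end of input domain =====

-- B inverts the traversal: normalized first characters are computed once, then the eight fixed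
-- (table, charset) pairs are scanned in output order and a table is emitted when any first
-- character lies in its charset; A's set, dict and per-candidate classification disappear (simpler).

-- ===== PORT A =====
def pvAdultBucketDict : PySem.Dict String String := PySem.Dict.ofList
  [("0-9.txt", "adult_domain_bucket_0_9"),
   ("a-d.txt", "adult_domain_bucket_a_d"),
   ("e-h.txt", "adult_domain_bucket_e_h"),
   ("i-l.txt", "adult_domain_bucket_i_l"),
   ("m-p.txt", "adult_domain_bucket_m_p"),
   ("q-t.txt", "adult_domain_bucket_q_t"),
   ("u-x.txt", "adult_domain_bucket_u_x"),
   ("y-z.txt", "adult_domain_bucket_y_z"),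
   ("old.txt", "adult_domain_bucket_old")]

def bucket_file_for_domain (domain : String) : String :=
  -- ch = (domain.strip().lower()[:1] if domain else "")
  let ch : String := if domain = "" then "" else PySem.Str.slice (PySem.Str.lower (PySem.Str.strip domain)) none (some 1)
  if ch = "" then "old.txt"
  else if PySem.Str.strIsdigit ch then "0-9.txt"
  else if "a" ≤ ch ∧ ch ≤ "d" then "a-d.txt"
  else if "e" ≤ ch ∧ ch ≤ "h" then "e-h.txt"
  else if "i" ≤ ch ∧ ch ≤ "l" then "i-l.txt"
  else if "m" ≤ ch ∧ ch ≤ "p" then "m-p.txt"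
  else if "q" ≤ ch ∧ ch ≤ "t" then "q-t.txt"
  else if "u" ≤ ch ∧ ch ≤ "x" then "u-x.txt"
  else if "y" ≤ ch ∧ ch ≤ "z" then "y-z.txt"
  else "old.txt"

-- Python's ADULT_BUCKET_FILE_TO_TABLE["old.txt"] is ported as getD with default "":
-- the key "old.txt" is a literal key of the literal dict, so the subscript never raises.
def bucket_table_names_for_candidates_py (candidates : List String) : List String :=
  if candidates = [] then [PySem.Dict.getD pvAdultBucketDict "old.txt" ""]
  else
    let names : PySem.Set String :=
      candidates.foldl (fun names candidate =>
        let bucket_file := bucket_file_for_domain candidate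
        PySem.Set.add names (PySem.Dict.getD pvAdultBucketDict bucket_file
          (PySem.Dict.getD pvAdultBucketDict "old.txt" ""))) PySem.Set.empty
    let names := PySem.Set.add names (PySem.Dict.getD pvAdultBucketDict "old.txt" "")
    let ordered := (PySem.Dict.values pvAdultBucketDict).filter (fun table => PySem.Set.contains names table)
    if ordered = [] then [PySem.Dict.getD pvAdultBucketDict "old.txt" ""] else ordered

-- ===== PORT B =====
def pvBucketCharsets : List (String × List Char) :=
  [("adult_domain_bucket_0_9", ['0','1','2','3','4','5','6','7','8','9']),
   ("adult_domain_bucket_a_d", ['a','b','c','d']),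
   ("adult_domain_bucket_e_h", ['e','f','g','h']),
   ("adult_domain_bucket_i_l", ['i','j','k','l']),
   ("adult_domain_bucket_m_p", ['m','n','o','p']),
   ("adult_domain_bucket_q_t", ['q','r','s','t']),
   ("adult_domain_bucket_u_x", ['u','v','w','x']),
   ("adult_domain_bucket_y_z", ['y','z'])]

-- firsts = [t[0] for t in (c.strip().lower() for c in candidates) if t]
-- tables = [table for table, chars in _BUCKET_CHARSETS if any(ch in chars for ch in firsts)]
-- tables.append("adult_domain_bucket_old"); return tables
def bucket_table_names_for_candidates_py_alt (candidates : List String) : List String :=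
  let firsts : List Char := candidates.filterMap (fun c =>
    (PySem.Str.lower (PySem.Str.strip c)).toList.head?)
  let tables := (pvBucketCharsets.filter (fun q => firsts.any (fun ch => q.2.contains ch))).map (fun q => q.1)
  tables ++ ["adult_domain_bucket_old"]

-- ===== PRECONDITION & SPEC =====
def Spec_bucket_table_names_for_candidates_py (candidates : List String) (out : List String) : Prop := out = bucket_table_names_for_candidates_py_alt candidates
instance (candidates : List String) (out : List String) : Decidable (Spec_bucket_table_names_for_candidates_py candidates out) := by unfold Spec_bucket_table_names_for_candidates_py; infer_instance

-- ===== CLAIM (what is proved, stated in full; the proofs are below) =====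
def Claim_equal_bucket_table_names_for_candidates_py : Prop := ∀ (candidates : List String), Dom_bucket_table_names_for_candidates_py candidates → Spec_bucket_table_names_for_candidates_py candidates (bucket_table_names_for_candidates_py candidates)

-- ===== LEMMAS AND PROOFS =====

def pvBucketFiles : List String :=
  ["0-9.txt", "a-d.txt", "e-h.txt", "i-l.txt", "m-p.txt", "q-t.txt", "u-x.txt", "y-z.txt", "old.txt"]

def pvBucketTables : List String :=
  ["adult_domain_bucket_0_9",
   "adult_domain_bucket_a_d",
   "adult_domain_bucket_e_h",
   "adult_domain_bucket_i_l",
   "adult_domain_bucket_m_p",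
   "adult_domain_bucket_q_t",
   "adult_domain_bucket_u_x",
   "adult_domain_bucket_y_z",
   "adult_domain_bucket_old"]

-- proof-side bucket index of a candidate (8 = old)
def pvIdxChar (c : Char) : Nat :=
  if PySem.Chars.isdigit c then 0
  else if 'a' ≤ c ∧ c ≤ 'z' then 1 + (c.toNat - 'a'.toNat) / 4
  else 8

def pvIdx (domain : String) : Nat :=
  match (PySem.Str.lower (PySem.Str.strip domain)).toList with
  | [] => 8
  | c :: _ => pvIdxChar c

theorem pv_singleton_lt (a c : Char) : ([a] < [c]) ↔ a < c := by
  show List.Lex _ _ _ ↔ _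
  constructor
  · intro h; cases h with
    | rel h => exact h
    | cons h => cases h
  · intro h; exact List.Lex.rel h

theorem pv_singleton_le (a c : Char) : ([a] ≤ [c]) ↔ a ≤ c := by
  simp [le_iff_lt_or_eq, pv_singleton_lt]

theorem pv_str_le_single (s t : String) (a c : Char) (hs : s.toList = [a]) (ht : t.toList = [c]) :
    (s ≤ t) ↔ a ≤ c := by
  rw [String.le_iff_toList_le, hs, ht, pv_singleton_le]

theorem pv_char_le_iff (a b : Char) : (a ≤ b) ↔ a.toNat ≤ b.toNat := ge_iff_le

theorem pv_bucketFile_eq (domain : String) :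
    bucket_file_for_domain domain = pvBucketFiles.getD (pvIdx domain) "" := by
  by_cases hd : domain = ""
  · subst hd; rfl
  · unfold bucket_file_for_domain
    simp only [if_neg hd, pvIdx, pvIdxChar]
    set t := PySem.Str.lower (PySem.Str.strip domain) with htdef
    have hch : (PySem.Str.slice t none (some 1)).toList = t.toList.take 1 := by
      rw [PySem.Str.toList_slice, PySem.Chars.slice_eq_listSlice,
        PySem.List.slice_to (xs := t.toList) (b := 1) (by norm_num)]
      rfl
    cases htl : t.toList with
    | nil =>
      have hempty : PySem.Str.slice t none (some 1) = "" := by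
        have h2 : (PySem.Str.slice t none (some 1)).toList = [] := by rw [hch, htl]; rfl
        have := congrArg String.ofList h2
        rwa [String.ofList_toList] at this
      rw [hempty]
      rfl
    | cons c rest =>
      have hch1 : (PySem.Str.slice t none (some 1)).toList = [c] := by rw [hch, htl]; rfl
      have hne : ¬ (PySem.Str.slice t none (some 1) = "") := by
        intro h; rw [h] at hch1; simp at hch1
      have hdig : PySem.Str.strIsdigit (PySem.Str.slice t none (some 1)) = PySem.Chars.isdigit c := by
        rw [PySem.Str.strIsdigit_eq, hch1]
        simp [PySem.Chars.strIsdigit]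
      simp only [if_neg hne, hdig,
        pv_str_le_single "a" _ 'a' c rfl hch1, pv_str_le_single _ "d" c 'd' hch1 rfl,
        pv_str_le_single "e" _ 'e' c rfl hch1, pv_str_le_single _ "h" c 'h' hch1 rfl,
        pv_str_le_single "i" _ 'i' c rfl hch1, pv_str_le_single _ "l" c 'l' hch1 rfl,
        pv_str_le_single "m" _ 'm' c rfl hch1, pv_str_le_single _ "p" c 'p' hch1 rfl,
        pv_str_le_single "q" _ 'q' c rfl hch1, pv_str_le_single _ "t" c 't' hch1 rfl,
        pv_str_le_single "u" _ 'u' c rfl hch1, pv_str_le_single _ "x" c 'x' hch1 rfl,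
        pv_str_le_single "y" _ 'y' c rfl hch1, pv_str_le_single _ "z" c 'z' hch1 rfl,
        pv_char_le_iff,
        show ('a' : Char).toNat = 97 from rfl, show ('d' : Char).toNat = 100 from rfl,
        show ('e' : Char).toNat = 101 from rfl, show ('h' : Char).toNat = 104 from rfl,
        show ('i' : Char).toNat = 105 from rfl, show ('l' : Char).toNat = 108 from rfl,
        show ('m' : Char).toNat = 109 from rfl, show ('p' : Char).toNat = 112 from rfl,
        show ('q' : Char).toNat = 113 from rfl, show ('t' : Char).toNat = 116 from rfl,
        show ('u' : Char).toNat = 117 from rfl, show ('x' : Char).toNat = 120 from rfl,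
        show ('y' : Char).toNat = 121 from rfl, show ('z' : Char).toNat = 122 from rfl]
      split_ifs <;> first
        | rfl
        | omega
        | (rw [show 1 + (c.toNat - 97) / 4 = 1 from by omega]; rfl)
        | (rw [show 1 + (c.toNat - 97) / 4 = 2 from by omega]; rfl)
        | (rw [show 1 + (c.toNat - 97) / 4 = 3 from by omega]; rfl)
        | (rw [show 1 + (c.toNat - 97) / 4 = 4 from by omega]; rfl)
        | (rw [show 1 + (c.toNat - 97) / 4 = 5 from by omega]; rfl)
        | (rw [show 1 + (c.toNat - 97) / 4 = 6 from by omega]; rfl)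
        | (rw [show 1 + (c.toNat - 97) / 4 = 7 from by omega]; rfl)

theorem pv_idx_lt (domain : String) : pvIdx domain < 9 := by
  simp only [pvIdx, pvIdxChar]
  split
  · omega
  · split_ifs with h1 h2
    · omega
    · have hz : ('z' : Char).toNat = 122 := rfl
      have ha : ('a' : Char).toNat = 97 := rfl
      have := (pv_char_le_iff _ 'z').mp h2.2
      omega
    · omega

-- the value A adds to `names` for a candidate, in terms of the proof-side index
theorem pv_tabOf_eq (domain : String) :
    PySem.Dict.getD pvAdultBucketDict (bucket_file_for_domain domain)
      (PySem.Dict.getD pvAdultBucketDict "old.txt" "")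
      = pvBucketTables.getD (pvIdx domain) "" := by
  rw [pv_bucketFile_eq]
  have h := pv_idx_lt domain
  set i := pvIdx domain with hi
  interval_cases i <;> decide

theorem pv_mem_foldl_add (l : List String) (f : String → String) (init : PySem.Set String) (x : String) :
    x ∈ l.foldl (fun s c => PySem.Set.add s (f c)) init ↔ x ∈ init ∨ ∃ c ∈ l, f c = x := by
  induction l generalizing init with
  | nil => simp
  | cons a l ih =>
    simp only [List.foldl_cons, ih, PySem.Set.mem_add, List.mem_cons]
    constructor
    · rintro (⟨h | h⟩ | h)
      · exact Or.inl h
      · exact Or.inr ⟨a, Or.inl rfl, h.symm⟩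
      · obtain ⟨c, hc, hfc⟩ := h; exact Or.inr ⟨c, Or.inr hc, hfc⟩
    · rintro (h | ⟨c, hc | hc, hfc⟩)
      · exact Or.inl (Or.inl h)
      · subst hc; exact Or.inl (Or.inr hfc.symm)
      · exact Or.inr ⟨c, hc, hfc⟩

theorem pv_tables_getD_inj (j k : Nat) (hj : j < 9) (hk : k < 9) :
    pvBucketTables.getD j "" = pvBucketTables.getD k "" ↔ j = k := by
  interval_cases j <;> interval_cases k <;> simp [pvBucketTables]

theorem pv_contains_iff (candidates : List String) (x : String) :
    PySem.Set.contains
      (PySem.Set.add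
        (candidates.foldl (fun names candidate =>
          PySem.Set.add names (PySem.Dict.getD pvAdultBucketDict (bucket_file_for_domain candidate)
            (PySem.Dict.getD pvAdultBucketDict "old.txt" ""))) PySem.Set.empty)
        (PySem.Dict.getD pvAdultBucketDict "old.txt" "")) x = true
    ↔ (x = "adult_domain_bucket_old" ∨ ∃ c ∈ candidates, pvBucketTables.getD (pvIdx c) "" = x) := by
  have hcont : ∀ (s : PySem.Set String) (y : String), PySem.Set.contains s y = true ↔ y ∈ s := by
    intro s y; simp [PySem.Set.contains]
  rw [hcont, PySem.Set.mem_add,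
    pv_mem_foldl_add candidates
      (fun candidate => PySem.Dict.getD pvAdultBucketDict (bucket_file_for_domain candidate)
        (PySem.Dict.getD pvAdultBucketDict "old.txt" "")) PySem.Set.empty x]
  have hold : PySem.Dict.getD pvAdultBucketDict "old.txt" "" = "adult_domain_bucket_old" := rfl
  have hmemempty : (x ∈ PySem.Set.empty) = False := by simp [PySem.Set.empty]
  constructor
  · rintro (⟨h | ⟨c, hc, hf⟩⟩ | h)
    · rw [hmemempty] at h; exact h.elim
    · rw [pv_tabOf_eq] at hf; exact Or.inr ⟨c, hc, hf⟩
    · rw [hold] at h; exact Or.inl h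
  · rintro (h | ⟨c, hc, hf⟩)
    · exact Or.inr (by rw [hold]; exact h)
    · exact Or.inl (Or.inr ⟨c, hc, by rw [pv_tabOf_eq]; exact hf⟩)

-- pvIdxChar as arithmetic on the code point
theorem pv_idxChar_eq (c : Char) :
    pvIdxChar c = (if 48 ≤ c.toNat ∧ c.toNat ≤ 57 then 0
      else if 97 ≤ c.toNat ∧ c.toNat ≤ 122 then 1 + (c.toNat - 97) / 4 else 8) := by
  have hdig : PySem.Chars.isdigit c = true ↔ (48 ≤ c.toNat ∧ c.toNat ≤ 57) := by
    rw [show PySem.Chars.isdigit c = ('0' ≤ c && c ≤ '9') from by simp [PySem.Chars.isdigit]]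
    simp only [Bool.and_eq_true, decide_eq_true_eq, pv_char_le_iff,
      show ('0' : Char).toNat = 48 from rfl, show ('9' : Char).toNat = 57 from rfl]
  have hrange : ('a' ≤ c ∧ c ≤ 'z') ↔ (97 ≤ c.toNat ∧ c.toNat ≤ 122) := by
    simp only [pv_char_le_iff,
      show ('a' : Char).toNat = 97 from rfl, show ('z' : Char).toNat = 122 from rfl]
  simp only [pvIdxChar]
  by_cases h1 : 48 ≤ c.toNat ∧ c.toNat ≤ 57
  · rw [if_pos (hdig.mpr h1), if_pos h1]
  · rw [if_neg (fun h => h1 (hdig.mp h)), if_neg h1]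
    by_cases h2 : 97 ≤ c.toNat ∧ c.toNat ≤ 122
    · rw [if_pos (hrange.mpr h2), if_pos h2, show ('a' : Char).toNat = 97 from rfl]
    · rw [if_neg (fun h => h2 (hrange.mp h)), if_neg h2]

-- membership of a first char in the k-th charset is exactly "bucket index = k"
theorem pv_charset_mem (ch : Char) (k : Nat) (hk : k < 8) :
    ((pvBucketCharsets.getD k ("", [])).2.contains ch = true) ↔ pvIdxChar ch = k := by
  have hinj : ∀ b : Char, ch = b ↔ ch.toNat = b.toNat := by
    intro b
    constructor
    · intro h; rw [h]
    · intro h; exact Char.ofNat_toNat ch ▸ Char.ofNat_toNat b ▸ congrArg Char.ofNat h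
  rw [pv_idxChar_eq]
  interval_cases k <;>
    simp only [pvBucketCharsets, List.getD, List.getElem?_cons_zero,
      List.getElem?_cons_succ, Option.getD_some, List.contains_eq_mem, List.mem_cons,
      List.not_mem_nil, or_false, decide_eq_true_eq, hinj,
      show ('0' : Char).toNat = 48 from rfl,
      show ('1' : Char).toNat = 49 from rfl,
      show ('2' : Char).toNat = 50 from rfl,
      show ('3' : Char).toNat = 51 from rfl,
      show ('4' : Char).toNat = 52 from rfl,
      show ('5' : Char).toNat = 53 from rfl,
      show ('6' : Char).toNat = 54 from rfl,
      show ('7' : Char).toNat = 55 from rfl,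
      show ('8' : Char).toNat = 56 from rfl,
      show ('9' : Char).toNat = 57 from rfl,
      show ('a' : Char).toNat = 97 from rfl,
      show ('b' : Char).toNat = 98 from rfl,
      show ('c' : Char).toNat = 99 from rfl,
      show ('d' : Char).toNat = 100 from rfl,
      show ('e' : Char).toNat = 101 from rfl,
      show ('f' : Char).toNat = 102 from rfl,
      show ('g' : Char).toNat = 103 from rfl,
      show ('h' : Char).toNat = 104 from rfl,
      show ('i' : Char).toNat = 105 from rfl,
      show ('j' : Char).toNat = 106 from rfl,
      show ('k' : Char).toNat = 107 from rfl,
      show ('l' : Char).toNat = 108 from rfl,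
      show ('m' : Char).toNat = 109 from rfl,
      show ('n' : Char).toNat = 110 from rfl,
      show ('o' : Char).toNat = 111 from rfl,
      show ('p' : Char).toNat = 112 from rfl,
      show ('q' : Char).toNat = 113 from rfl,
      show ('r' : Char).toNat = 114 from rfl,
      show ('s' : Char).toNat = 115 from rfl,
      show ('t' : Char).toNat = 116 from rfl,
      show ('u' : Char).toNat = 117 from rfl,
      show ('v' : Char).toNat = 118 from rfl,
      show ('w' : Char).toNat = 119 from rfl,
      show ('x' : Char).toNat = 120 from rfl,
      show ('y' : Char).toNat = 121 from rfl,
      show ('z' : Char).toNat = 122 from rfl] <;>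
    (split_ifs with hc1 hc2 <;> constructor <;> intro h <;> first | trivial | exact h.elim | omega)

-- B's per-bucket scan, characterized: any first char in charset k ↔ some candidate has index k
theorem pv_any_firsts (candidates : List String) (k : Nat) (hk : k < 8) :
    ((candidates.filterMap (fun c => (PySem.Str.lower (PySem.Str.strip c)).toList.head?)).any
        (fun ch => (pvBucketCharsets.getD k ("", [])).2.contains ch) = true)
      ↔ ∃ c ∈ candidates, pvIdx c = k := by
  rw [List.any_eq_true]
  constructor
  · rintro ⟨ch, hch, hmem⟩
    obtain ⟨c, hc, hhead⟩ := List.mem_filterMap.mp hch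
    refine ⟨c, hc, ?_⟩
    have hidx := (pv_charset_mem ch k hk).mp hmem
    unfold pvIdx
    cases htl : (PySem.Str.lower (PySem.Str.strip c)).toList with
    | nil => rw [htl] at hhead; simp at hhead
    | cons a rest =>
      rw [htl] at hhead; simp only [List.head?_cons, Option.some.injEq] at hhead
      rw [hhead]; exact hidx
  · rintro ⟨c, hc, hidx⟩
    unfold pvIdx at hidx
    cases htl : (PySem.Str.lower (PySem.Str.strip c)).toList with
    | nil =>
      rw [htl] at hidx
      have h8 : (8 : Nat) = k := hidx
      omega
    | cons a rest =>
      rw [htl] at hidx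
      have hidx' : pvIdxChar a = k := hidx
      refine ⟨a, List.mem_filterMap.mpr ⟨c, hc, by rw [htl]; rfl⟩, ?_⟩
      exact (pv_charset_mem a k hk).mpr hidx'

-- ===== VERDICT (by name: the statement is the Claim_ definition above) =====
theorem bucket_table_names_for_candidates_py_spec : Claim_equal_bucket_table_names_for_candidates_py := by
  intro candidates _hdom
  unfold Spec_bucket_table_names_for_candidates_py
  by_cases hnil : candidates = []
  · subst hnil; decide
  · unfold bucket_table_names_for_candidates_py bucket_table_names_for_candidates_py_alt
    simp only [if_neg hnil]
    set P : String → Bool := fun table => PySem.Set.contains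
      (PySem.Set.add
        (candidates.foldl (fun names candidate =>
          PySem.Set.add names (PySem.Dict.getD pvAdultBucketDict (bucket_file_for_domain candidate)
            (PySem.Dict.getD pvAdultBucketDict "old.txt" ""))) PySem.Set.empty)
        (PySem.Dict.getD pvAdultBucketDict "old.txt" "")) table with hP
    set firsts : List Char := candidates.filterMap (fun c =>
      (PySem.Str.lower (PySem.Str.strip c)).toList.head?) with hfirsts
    have hPk : ∀ k : Nat, k < 8 →
        P (pvBucketTables.getD k "") = firsts.any (fun ch => (pvBucketCharsets.getD k ("", [])).2.contains ch) := by
      intro k hk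
      rw [Bool.eq_iff_iff, hP, hfirsts]
      rw [pv_contains_iff, pv_any_firsts candidates k hk]
      constructor
      · rintro (h | ⟨c, hc, hf⟩)
        · exfalso
          have h8k : (8 : Nat) = k := by
            rw [← pv_tables_getD_inj 8 k (by omega) (by omega)]
            exact h ▸ rfl
          omega
        · exact ⟨c, hc, by
            rw [← pv_tables_getD_inj (pvIdx c) k (pv_idx_lt c) (by omega)]; exact hf⟩
      · rintro ⟨c, hc, hidx⟩
        exact Or.inr ⟨c, hc, by rw [hidx]⟩
    have hPold : P "adult_domain_bucket_old" = true := by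
      rw [hP, pv_contains_iff]; exact Or.inl rfl
    have hvals : PySem.Dict.values pvAdultBucketDict = pvBucketTables := rfl
    have hsplit : pvBucketTables = (pvBucketCharsets.map Prod.fst) ++ ["adult_domain_bucket_old"] := rfl
    have hfilterold : List.filter P ["adult_domain_bucket_old"] = ["adult_domain_bucket_old"] := by
      simp [List.filter, hPold]
    have hcongr : (pvBucketCharsets.map Prod.fst).filter P
        = (pvBucketCharsets.filter (fun q => firsts.any (fun ch => q.2.contains ch))).map Prod.fst := by
      rw [List.filter_map]
      refine congrArg _ (List.filter_congr ?_)
      intro q hq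
      simp only [Function.comp_apply]
      fin_cases hq
      · exact hPk 0 (by omega)
      · exact hPk 1 (by omega)
      · exact hPk 2 (by omega)
      · exact hPk 3 (by omega)
      · exact hPk 4 (by omega)
      · exact hPk 5 (by omega)
      · exact hPk 6 (by omega)
      · exact hPk 7 (by omega)
    rw [hvals, hsplit, List.filter_append, hfilterold, hcongr]
    rw [if_neg (by simp)]
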